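-- pv_equiv track=rewrite | github.com/abenezer54/competitive-programming | 1454-remove-palindromic-subsequences/1454-remove-palindromic-subsequences.py | removePalindromeSub
-- ===== SOURCE A (Python) =====
-- def removePalindromeSub(s: str) -> int:
--     l = 0
--     r = len(s) - 1
--     while l < r:
--         if s[l] != s[r]:
--             return 2
--         l += 1
--         r -= 1
--     return 1
-- ===== SOURCE B (Python) =====
-- def removePalindromeSub(s: str) -> int:
--     return 1 if s == s[::-1] else 2
-- ===== Notes on version B (the rewrite author's own statement) =====
-- stated objective: idiomatic
-- what changed: Replaces the two-pointer index loop with a single reversal-and-compare expression (s == s[::-1]).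
import Mathlib
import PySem

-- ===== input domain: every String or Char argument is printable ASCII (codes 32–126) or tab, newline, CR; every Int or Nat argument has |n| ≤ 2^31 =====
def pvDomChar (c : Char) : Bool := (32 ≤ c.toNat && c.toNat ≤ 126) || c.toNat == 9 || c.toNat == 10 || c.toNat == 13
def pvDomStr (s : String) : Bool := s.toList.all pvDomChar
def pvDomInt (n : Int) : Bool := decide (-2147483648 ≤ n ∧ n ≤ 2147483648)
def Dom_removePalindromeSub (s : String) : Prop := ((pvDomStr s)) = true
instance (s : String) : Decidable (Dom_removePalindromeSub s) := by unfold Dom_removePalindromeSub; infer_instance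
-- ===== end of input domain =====

-- B replaces A's two-pointer index loop by a single reversal-and-compare (idiomatic; same cost).

-- ===== PORT A =====
-- A's while-loop: two indices l, r moving inwards; s[l]/s[r] are always in
-- range when read (0 ≤ l < r < len s), so pyGetD with a dummy default is exact here.
def pvLoopA (cs : List Char) (l r : Int) : Int :=
  if l < r then
    if PySem.List.pyGetD cs l ' ' ≠ PySem.List.pyGetD cs r ' ' then 2
    else pvLoopA cs (l + 1) (r - 1)
  else 1
termination_by (r - l).toNat
decreasing_by omega

def removePalindromeSub (s : String) : Int :=
  pvLoopA s.toList 0 ((PySem.Str.len s : Int) - 1)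

-- ===== PORT B =====
def removePalindromeSub_alt (s : String) : Int :=
  if s.toList = s.toList.reverse then 1 else 2

-- ===== PRECONDITION & SPEC =====
def Spec_removePalindromeSub (s : String) (out : Int) : Prop := out = removePalindromeSub_alt s
instance (s : String) (out : Int) : Decidable (Spec_removePalindromeSub s out) := by unfold Spec_removePalindromeSub; infer_instance

-- ===== CLAIM (what is proved, stated in full; the proofs are below) =====
def Claim_equal_removePalindromeSub : Prop := ∀ (s : String), Dom_removePalindromeSub s → Spec_removePalindromeSub s (removePalindromeSub s)

-- ===== LEMMAS AND PROOFS =====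

-- Valid in-range reads reduce to List.getD at the Nat index.
lemma pyGetD_toNat (xs : List Char) (i : Int) (hi : 0 ≤ i) :
    PySem.List.pyGetD xs i ' ' = xs.getD i.toNat ' ' := by
  conv_lhs => rw [show i = ((i.toNat : Nat) : Int) from by omega, PySem.List.pyGetD_natCast]

-- Shifting the loop off a matched outer pair: reading a :: xs ++ [b] at l+1, r+1
-- is reading xs at l, r, as long as r stays below xs.length.
lemma pvLoopA_shift (a b : Char) (xs : List Char) :
    ∀ (n : Nat) (l r : Int), (r - l).toNat ≤ n → 0 ≤ l → r < xs.length →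
      pvLoopA (a :: (xs ++ [b])) (l + 1) (r + 1) = pvLoopA xs l r := by
  intro n
  induction n with
  | zero =>
    intro l r h _ _
    conv_lhs => rw [pvLoopA]
    conv_rhs => rw [pvLoopA]
    rw [if_neg (show ¬ l + 1 < r + 1 from by omega), if_neg (show ¬ l < r from by omega)]
  | succ n ih =>
    intro l r h hl hr
    by_cases hlr : l < r
    · conv_lhs => rw [pvLoopA]
      conv_rhs => rw [pvLoopA]
      have h1 : PySem.List.pyGetD (a :: (xs ++ [b])) (l + 1) ' ' = PySem.List.pyGetD xs l ' ' := by
        rw [pyGetD_toNat _ _ (by omega), pyGetD_toNat _ _ hl,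
            show (l + 1).toNat = l.toNat + 1 from by omega]
        rw [List.getD_cons_succ]
        exact List.getD_append _ _ _ _ (by omega)
      have h2 : PySem.List.pyGetD (a :: (xs ++ [b])) (r + 1) ' ' = PySem.List.pyGetD xs r ' ' := by
        rw [pyGetD_toNat _ _ (by omega), pyGetD_toNat _ _ (by omega),
            show (r + 1).toNat = r.toNat + 1 from by omega]
        rw [List.getD_cons_succ]
        exact List.getD_append _ _ _ _ (by omega)
      rw [if_pos (show l + 1 < r + 1 from by omega), if_pos hlr, h1, h2]
      split
      · rfl
      · rw [show r + 1 - 1 = (r - 1) + 1 from by ring]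
        exact ih (l + 1) (r - 1) (by omega) (by omega) (by omega)
    · conv_lhs => rw [pvLoopA]
      conv_rhs => rw [pvLoopA]
      rw [if_neg (show ¬ l + 1 < r + 1 from by omega), if_neg hlr]

-- Main characterisation of A's loop started at (0, len-1), by fuel on the length.
lemma pvLoopA_main_fuel : ∀ (n : Nat) (cs : List Char), cs.length ≤ n →
    pvLoopA cs 0 ((cs.length : Int) - 1) = if cs = cs.reverse then 1 else 2 := by
  intro n
  induction n with
  | zero =>
    intro cs hle
    have : cs = [] := List.eq_nil_of_length_eq_zero (by omega)
    subst this
    rw [pvLoopA]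
    simp
  | succ n ih =>
    intro cs hle
    match cs with
    | [] => rw [pvLoopA]; simp
    | [a] => rw [pvLoopA]; simp
    | a :: y :: ys =>
      obtain ⟨xs, b, hdecomp⟩ : ∃ xs b, y :: ys = xs ++ [b] :=
        ⟨(y :: ys).dropLast, (y :: ys).getLast (by simp),
          (List.dropLast_append_getLast (by simp)).symm⟩
      rw [show a :: y :: ys = a :: (xs ++ [b]) from by rw [hdecomp]] at *
      have hL : (a :: (xs ++ [b])).length = xs.length + 2 := by simp
      have hga : PySem.List.pyGetD (a :: (xs ++ [b])) 0 ' ' = a := PySem.List.pyGetD_zero_cons _ _ _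
      have hgb : PySem.List.pyGetD (a :: (xs ++ [b])) (((a :: (xs ++ [b])).length : Int) - 1) ' ' = b := by
        rw [pyGetD_toNat _ _ (by rw [hL]; push_cast; omega),
            show ((((a :: (xs ++ [b])).length : Nat) : Int) - 1).toNat = xs.length + 1 from by
              rw [hL]; omega]
        rw [List.getD_cons_succ]
        rw [List.getD_eq_getElem _ _ (by simp)]
        simp
      have hrev : (a :: (xs ++ [b])).reverse = b :: (xs.reverse ++ [a]) := by simp
      conv_lhs => rw [pvLoopA]
      rw [if_pos (show (0 : Int) < ((a :: (xs ++ [b])).length : Int) - 1 from by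
        rw [hL]; push_cast; omega)]
      by_cases hab : a = b
      · subst hab
        rw [if_neg (by rw [hga, hgb]; simp)]
        have step : pvLoopA (a :: (xs ++ [a])) (0 + 1) (((a :: (xs ++ [a])).length : Int) - 1 - 1)
            = pvLoopA xs 0 ((xs.length : Int) - 1) := by
          rw [show (((a :: (xs ++ [a])).length : Int)) - 1 - 1 = ((xs.length : Int) - 1) + 1 from by
            rw [hL]; push_cast; ring]
          exact pvLoopA_shift a a xs xs.length 0 ((xs.length : Int) - 1) (by omega) le_rfl (by omega)
        rw [step, ih xs (by omega)]
        have iff1 : (a :: (xs ++ [a])) = (a :: (xs ++ [a])).reverse ↔ xs = xs.reverse := by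
          rw [hrev]
          constructor
          · intro hh
            injection hh with _ hh
            exact List.append_inj_left' hh (by simp)
          · intro hh
            rw [← hh]
        by_cases hp : xs = xs.reverse
        · rw [if_pos hp, if_pos (iff1.mpr hp)]
        · rw [if_neg hp, if_neg (fun c => hp (iff1.mp c))]
      · rw [if_pos (by rw [hga, hgb]; exact hab)]
        rw [if_neg (by rw [hrev]; intro c; exact hab (by injection c))]

-- ===== VERDICT (by name: the statement is the Claim_ definition above) =====
theorem removePalindromeSub_spec : Claim_equal_removePalindromeSub := by
  intro s _
  unfold Spec_removePalindromeSub removePalindromeSub removePalindromeSub_alt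
  rw [show (PySem.Str.len s : Int) = (s.toList.length : Int) from by simp [PySem.Str.len_eq]]
  exact pvLoopA_main_fuel s.toList.length s.toList le_rfl
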